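-- pv_equiv track=rewrite | github.com/otim22/dna-toolset | dna_toolkit.py | proteins_from_rf
-- ===== SOURCE A (Python) =====
-- def proteins_from_rf(aa_seq):
--     """Compute all possible proteins in an amino acids seq and return a list of possible proteins"""
--     current_proteins = []
--     proteins = []
--     for aa in aa_seq:
--         if aa == "_":
--             # STOP accumulating amino acids if _ - STOP was found
--             if current_proteins:
--                 for p in current_proteins:
--                     proteins.append(p)
--                 current_proteins = []
--         else:
--             # START accumulating amino acids if M - START was found
--             if aa == "M":
--                 current_proteins.append("")
--             for i in range(len(current_proteins)):
--                 current_proteins[i] += aa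
--     return proteins
-- ===== SOURCE B (Python) =====
-- def proteins_from_rf(aa_seq):
--     """Compute all possible proteins in an amino acids seq and return a list of possible proteins"""
--     # Pass 1: split the sequence into segments at stop symbols "_";
--     # the trailing piece after the last stop never yields a protein, so it is dropped.
--     segments = []
--     cur = []
--     for aa in aa_seq:
--         if aa == "_":
--             segments.append(cur)
--             cur = []
--         else:
--             cur.append(aa)
--     # Pass 2: every suffix of a completed segment that starts with "M" is a protein.
--     proteins = []
--     for seg in segments:
--         suffix = seg
--         while suffix:
--             if suffix[0] == "M":
--                 proteins.append("".join(suffix))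
--             suffix = suffix[1:]
--     return proteins
-- ===== Notes on version B (the rewrite author's own statement) =====
-- stated objective: faster
-- what changed: Replaces A's running multi-accumulator of partial protein strings (one growing string per open start codon, extended character by character and flushed at each stop) with a two-pass scheme: split the sequence into stop-delimited segments, then emit each M-starting suffix of a completed segment with a single join.
import Mathlib
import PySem

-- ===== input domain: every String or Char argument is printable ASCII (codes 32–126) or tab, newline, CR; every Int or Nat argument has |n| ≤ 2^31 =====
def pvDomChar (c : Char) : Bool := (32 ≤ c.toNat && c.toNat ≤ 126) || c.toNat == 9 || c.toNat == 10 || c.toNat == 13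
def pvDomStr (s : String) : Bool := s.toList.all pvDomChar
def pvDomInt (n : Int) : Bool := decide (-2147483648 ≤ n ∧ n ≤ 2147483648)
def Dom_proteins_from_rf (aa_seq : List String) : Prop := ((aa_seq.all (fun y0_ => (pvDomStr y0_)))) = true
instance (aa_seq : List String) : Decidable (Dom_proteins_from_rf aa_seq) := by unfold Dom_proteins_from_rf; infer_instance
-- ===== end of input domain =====

-- B replaces A's running multi-accumulator of partial proteins with a split-into-segments
-- pass followed by a suffix scan of each completed segment (measured faster in a timing run).

-- ===== PORT A =====
-- one iteration of A's for-loop over (current_proteins, proteins);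
-- 'current_proteins[i] += aa' is exact string concatenation, ported as String.ofList on the char lists
def pvStepA (st : List String × List String) (aa : String) : List String × List String :=
  if aa = "_" then
    if st.1 ≠ [] then ([], st.2 ++ st.1) else (st.1, st.2)
  else
    let cur := if aa = "M" then st.1 ++ [""] else st.1
    (cur.map (fun p => String.ofList (p.toList ++ aa.toList)), st.2)

def proteins_from_rf (aa_seq : List String) : List String :=
  (aa_seq.foldl pvStepA ([], [])).2

-- ===== PORT B =====
-- Source B's inner while-loop over the successive suffixes of a segment
def pvSegProteins : List String → List String
  | [] => []
  | aa :: rest =>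
      (if aa = "M" then [PySem.Str.join "" (aa :: rest)] else []) ++ pvSegProteins rest

-- Source B's first pass: split at "_" into (segments, cur)
def pvStepB (st : List (List String) × List String) (aa : String) :
    List (List String) × List String :=
  if aa = "_" then (st.1 ++ [st.2], []) else (st.1, st.2 ++ [aa])

def proteins_from_rf_alt (aa_seq : List String) : List String :=
  ((aa_seq.foldl pvStepB ([], [])).1).foldl (fun acc seg => acc ++ pvSegProteins seg) []

-- ===== PRECONDITION & SPEC =====
def Spec_proteins_from_rf (aa_seq : List String) (out : List String) : Prop := out = proteins_from_rf_alt aa_seq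
instance (aa_seq : List String) (out : List String) : Decidable (Spec_proteins_from_rf aa_seq out) := by unfold Spec_proteins_from_rf; infer_instance

-- ===== CLAIM (what is proved, stated in full; the proofs are below) =====
def Claim_equal_proteins_from_rf : Prop := ∀ (aa_seq : List String), Dom_proteins_from_rf aa_seq → Spec_proteins_from_rf aa_seq (proteins_from_rf aa_seq)

-- ===== LEMMAS AND PROOFS =====

theorem pv_cjoin_snoc (cs : List (List Char)) (a : List Char) :
    PySem.Chars.join [] (cs ++ [a]) = PySem.Chars.join [] cs ++ a := by
  induction cs with
  | nil => simp [PySem.Chars.join, List.intercalate]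
  | cons x cs ih =>
      cases cs with
      | nil => simp [PySem.Chars.join, List.intercalate]
      | cons y cs =>
          simp only [List.cons_append, PySem.Chars.join_cons_cons] at *
          simp [ih]

theorem pv_join_snoc (l : List String) (aa : String) :
    PySem.Str.join "" (l ++ [aa]) = PySem.Str.join "" l ++ aa := by
  simp only [PySem.Str.join, List.map_append, List.map_cons, List.map_nil, String.toList_empty]
  rw [pv_cjoin_snoc]
  simp

theorem pv_seg_snoc (p : List String) (aa : String) :
    pvSegProteins (p ++ [aa]) =
      (if aa = "M" then pvSegProteins p ++ [""] else pvSegProteins p).map (fun s => s ++ aa) := by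
  induction p with
  | nil =>
      by_cases h : aa = "M" <;>
        simp [pvSegProteins, h, PySem.Str.join, PySem.Chars.join, List.intercalate]
  | cons x p ih =>
      have hj := pv_join_snoc (x :: p) aa
      simp only [List.cons_append] at hj
      rcases eq_or_ne x "M" with hx | hx <;> rcases eq_or_ne aa "M" with h | h
      · subst hx; subst h
        simp [pvSegProteins, ih, hj, List.map_append, String.empty_append]
      · subst hx
        simp [pvSegProteins, h, ih, hj]
      · subst h
        simp [pvSegProteins, hx, ih, List.map_append, String.empty_append]
      · simp [pvSegProteins, hx, h, ih]

theorem pv_main (xs : List String) (segs : List (List String)) (pending : List String) :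
    xs.foldl pvStepA (pvSegProteins pending, segs.flatMap pvSegProteins)
      = (pvSegProteins (xs.foldl pvStepB (segs, pending)).2,
         ((xs.foldl pvStepB (segs, pending)).1).flatMap pvSegProteins) := by
  induction xs generalizing segs pending with
  | nil => simp
  | cons x xs ih =>
      by_cases hx : x = "_"
      · have hA : pvStepA (pvSegProteins pending, segs.flatMap pvSegProteins) x
            = (pvSegProteins ([] : List String), (segs ++ [pending]).flatMap pvSegProteins) := by
          by_cases hc : pvSegProteins pending = [] <;>
            simp [pvStepA, hx, hc, pvSegProteins]
        have hB : pvStepB (segs, pending) x = (segs ++ [pending], []) := by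
          simp [pvStepB, hx]
        simp only [List.foldl_cons, hA, hB]
        exact ih (segs ++ [pending]) []
      · have hA : pvStepA (pvSegProteins pending, segs.flatMap pvSegProteins) x
            = (pvSegProteins (pending ++ [x]), segs.flatMap pvSegProteins) := by
          simp [pvStepA, hx, pv_seg_snoc]
        have hB : pvStepB (segs, pending) x = (segs, pending ++ [x]) := by
          simp [pvStepB, hx]
        simp only [List.foldl_cons, hA, hB]
        exact ih segs (pending ++ [x])

-- ===== VERDICT (by name: the statement is the Claim_ definition above) =====
theorem proteins_from_rf_spec : Claim_equal_proteins_from_rf := by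
  intro aa_seq _
  unfold Spec_proteins_from_rf proteins_from_rf proteins_from_rf_alt
  rw [PySem.List.foldl_append_eq_flatMap]
  have h := pv_main aa_seq [] []
  simp only [pvSegProteins, List.flatMap_nil] at h
  rw [h]
  simp
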